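-- pv_equiv track=rewrite | github.com/estevaofon/aru | arc/config.py | _parse_frontmatter
-- ===== SOURCE A (Python) =====
-- def _parse_frontmatter(content: str) -> tuple[dict[str, str], str]:
--     """Parse YAML-like frontmatter from a markdown file.
--
--     Returns (metadata_dict, body_content).
--     """
--     metadata: dict[str, str] = {}
--     body = content
--
--     if content.startswith("---"):
--         lines = content.split("\n")
--         end_idx = -1
--         for i in range(1, len(lines)):
--             if lines[i].strip() == "---":
--                 end_idx = i
--                 break
--         if end_idx > 0:
--             for line in lines[1:end_idx]:
--                 if ":" in line:
--                     key, _, value = line.partition(":")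
--                     metadata[key.strip()] = value.strip()
--             body = "\n".join(lines[end_idx + 1:]).strip()
--
--     return metadata, body
-- ===== SOURCE B (Python) =====
-- def _parse_frontmatter(content: str) -> tuple[dict[str, str], str]:
--     """Single pass over an iterator of lines: skip the opening marker, accumulate
--     key/value pairs until the closing '---' line, return early with the joined
--     remainder as body; if no closing marker is ever seen, fall back to the
--     original content with no metadata."""
--     if not content.startswith("---"):
--         return {}, content
--     lines = iter(content.split("\n"))
--     next(lines)  # the opening '---...' line
--     metadata: dict[str, str] = {}
--     for line in lines:
--         if line.strip() == "---":
--             return metadata, "\n".join(lines).strip()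
--         if ":" in line:
--             key, _, value = line.partition(":")
--             metadata[key.strip()] = value.strip()
--     return {}, content
-- ===== Notes on version B (the rewrite author's own statement) =====
-- stated objective: simpler
-- what changed: Replaces A's index search for the closing marker followed by two slice passes (lines[1:end_idx] and lines[end_idx+1:]) with a single early-returning pass over a consumed line iterator that accumulates metadata as it goes.
import Mathlib
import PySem

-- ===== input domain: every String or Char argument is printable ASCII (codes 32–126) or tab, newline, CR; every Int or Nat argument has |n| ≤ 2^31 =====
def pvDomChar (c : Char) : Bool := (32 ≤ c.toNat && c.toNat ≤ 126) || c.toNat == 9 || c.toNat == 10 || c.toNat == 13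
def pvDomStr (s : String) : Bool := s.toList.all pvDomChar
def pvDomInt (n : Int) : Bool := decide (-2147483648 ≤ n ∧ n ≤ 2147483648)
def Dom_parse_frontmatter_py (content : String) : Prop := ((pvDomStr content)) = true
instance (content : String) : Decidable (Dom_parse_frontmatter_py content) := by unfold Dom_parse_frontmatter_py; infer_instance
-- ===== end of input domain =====

-- B replaces A's search-for-the-closing-index plus two slice passes by one early-returning
-- pass over an iterator of the lines; objective: simpler (no index arithmetic, no slices).

-- exact port of Python's `line.partition(":")` (first and third components, single-char
-- separator): key = chars before the first ':', value = chars after it; both Pythons call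
-- it only under the guard `":" in line`, where this matches partition exactly.
def pvPartitionColon (s : String) : String × String :=
  let cs := s.toList
  let k := cs.takeWhile (fun c => c ≠ ':')
  (String.ofList k, String.ofList (cs.drop (k.length + 1)))

-- ===== PORT A =====
-- `for i in range(1, len(lines)): if lines[i].strip() == "---": end_idx = i; break`
-- transliterated as a walk over lines[1:] carrying the index i (starting at 1); exact.
def pvFindEnd : List String → Int → Int
  | [], _ => -1
  | l :: rest, i => if PySem.Str.strip l == "---" then i else pvFindEnd rest (i + 1)

def parse_frontmatter_py (content : String) : (List (String × String)) × String :=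
  let metadata : PySem.Dict String String := PySem.Dict.empty
  let body := content
  if PySem.Str.startswith content "---" then
    let lines := (PySem.Str.split? content "\n").getD []
    let end_idx := pvFindEnd lines.tail 1
    if end_idx > 0 then
      let metadata := (PySem.List.slice lines (some 1) (some end_idx)).foldl
        (fun d line =>
          if PySem.Str.isIn ":" line then
            let p := pvPartitionColon line
            d.insert (PySem.Str.strip p.1) (PySem.Str.strip p.2)
          else d) metadata
      let body := PySem.Str.strip
        (PySem.Str.join "\n" (PySem.List.slice lines (some (end_idx + 1)) none))
      (metadata.items, body)
    else (metadata.items, body)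
  else (metadata.items, body)

-- ===== PORT B =====
-- the `for line in lines:` loop over the consumed iterator, with its two early returns
def pvGoB (content : String) : PySem.Dict String String → List String → (List (String × String)) × String
  | _, [] => ([], content)
  | m, line :: rest =>
    if PySem.Str.strip line == "---" then
      (m.items, PySem.Str.strip (PySem.Str.join "\n" rest))
    else
      pvGoB content
        (if PySem.Str.isIn ":" line then
          let p := pvPartitionColon line
          m.insert (PySem.Str.strip p.1) (PySem.Str.strip p.2)
        else m) rest

def parse_frontmatter_py_alt (content : String) : (List (String × String)) × String :=
  if !(PySem.Str.startswith content "---") then ([], content)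
  else pvGoB content PySem.Dict.empty ((PySem.Str.split? content "\n").getD []).tail

-- ===== PRECONDITION & SPEC =====
def Spec_parse_frontmatter_py (content : String) (out : (List (String × String)) × String) : Prop := out = parse_frontmatter_py_alt content
instance (content : String) (out : (List (String × String)) × String) : Decidable (Spec_parse_frontmatter_py content out) := by unfold Spec_parse_frontmatter_py; infer_instance

-- ===== CLAIM (what is proved, stated in full; the proofs are below) =====
def Claim_equal_parse_frontmatter_py : Prop := ∀ (content : String), Dom_parse_frontmatter_py content → Spec_parse_frontmatter_py content (parse_frontmatter_py content)

-- ===== LEMMAS AND PROOFS =====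

def pvIsMarker (l : String) : Bool := PySem.Str.strip l == "---"

def pvStep (d : PySem.Dict String String) (line : String) : PySem.Dict String String :=
  if PySem.Str.isIn ":" line then
    let p := pvPartitionColon line
    d.insert (PySem.Str.strip p.1) (PySem.Str.strip p.2)
  else d

theorem pvFindEnd_eq (ls : List String) (i : Int) :
    pvFindEnd ls i = match ls.findIdx? pvIsMarker with
      | some k => i + k
      | none => -1 := by
  induction ls generalizing i with
  | nil => simp [pvFindEnd]
  | cons l rest ih =>
    rw [List.findIdx?_cons]
    cases h : (PySem.Str.strip l == "---") with
    | true => simp [pvFindEnd, h, pvIsMarker]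
    | false =>
      simp only [pvIsMarker, h, Bool.false_eq_true, if_false]
      rw [pvFindEnd, if_neg (by simp [h]), ih]
      cases hf : rest.findIdx? pvIsMarker with
      | none => simp
      | some k => simp; ring

theorem pvGoB_eq (content : String) (ls : List String) (d : PySem.Dict String String) :
    pvGoB content d ls = match ls.findIdx? pvIsMarker with
      | none => ([], content)
      | some k => (((ls.take k).foldl pvStep d).items,
          PySem.Str.strip (PySem.Str.join "\n" (ls.drop (k + 1)))) := by
  induction ls generalizing d with
  | nil => simp [pvGoB]
  | cons l rest ih =>
    rw [List.findIdx?_cons]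
    cases h : (PySem.Str.strip l == "---") with
    | true => simp [pvGoB, h, pvIsMarker]
    | false =>
      simp only [pvIsMarker, h, Bool.false_eq_true, if_false]
      rw [pvGoB, if_neg (by simp [h]), ih]
      cases hf : rest.findIdx? pvIsMarker with
      | none => simp
      | some k => simp [List.take_succ_cons, List.foldl_cons, pvStep]

-- ===== VERDICT (by name: the statement is the Claim_ definition above) =====
theorem parse_frontmatter_py_spec : Claim_equal_parse_frontmatter_py := by
  intro content _
  unfold Spec_parse_frontmatter_py parse_frontmatter_py parse_frontmatter_py_alt
  cases hs : PySem.Str.startswith content "---" with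
  | false => rfl
  | true =>
    rw [if_pos rfl, if_neg (show ¬ (((!true) : Bool) = true) by decide)]
    generalize (PySem.Str.split? content "\n").getD [] = lines
    rw [pvGoB_eq]
    cases lines with
    | nil =>
      simp only [List.tail_nil, pvFindEnd, List.findIdx?_nil]
      rw [if_neg (by norm_num)]
      rfl
    | cons l0 ls =>
      simp only [List.tail_cons]
      rw [pvFindEnd_eq]
      cases hf : ls.findIdx? pvIsMarker with
      | none => simp; rfl
      | some k =>
        have h1 : (0 : Int) < 1 + (k : Int) := by positivity
        simp only [h1, if_pos]
        have hsl2 : PySem.List.slice (l0 :: ls) (some (1 : Int)) (some ((1 : Int) + (k : Int)))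
            = ls.take k := by
          have h := PySem.List.slice_natCast (l0 :: ls) 1 (1 + k)
          push_cast at h
          simpa [Nat.add_sub_cancel_left] using h
        have hsl3 : PySem.List.slice (l0 :: ls) (some ((1 : Int) + (k : Int) + 1)) none
            = ls.drop (k + 1) := by
          have h := PySem.List.slice_from_natCast (l0 :: ls) (k + 2)
          push_cast at h
          rw [show ((1 : Int) + (k : Int) + 1) = (k : Int) + 2 by ring]
          simpa using h
        rw [hsl2, hsl3]
        rfl
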